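-- pv_equiv track=rewrite | github.com/aniknagato/a-priori-and-pcy | a_priori.py | fis3
-- ===== SOURCE A (Python) =====
-- def fis3(baskets, freq_item1, threshold):
--     freq = {}
--     freq_items = {}
--     for basket in baskets:
--         for i in range(len(basket)):
--             for j in range(i+1,len(basket)):
--                 for k in range (j+1,len(basket)):
--                     if basket[i] in freq_item1 and basket[j] in freq_item1 and basket[k] in freq_item1:
--                         l = [basket[i],basket[j],basket[k]]
--                         l.sort()
--                         if (l[0],l[1],l[2]) not in freq:
--                             freq[(l[0],l[1],l[2])] = 0
--                         freq[(l[0],l[1],l[2])] += 1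
--     for k,v in freq.items():
--         if v > threshold:
--             freq_items[k] = v
--     return freq, freq_items
-- ===== SOURCE B (Python) =====
-- def _pairs(items):
--     if not items:
--         return []
--     head, tail = items[0], items[1:]
--     return [(head, y) for y in tail] + _pairs(tail)
--
--
-- def _triples(items):
--     if not items:
--         return []
--     head, tail = items[0], items[1:]
--     return [(head, y, z) for (y, z) in _pairs(tail)] + _triples(tail)
--
--
-- def fis3(baskets, freq_item1, threshold):
--     frequent = set(freq_item1)
--     freq = {}
--     for basket in baskets:
--         for t in _triples([x for x in basket if x in frequent]):
--             a, b, c = sorted(t)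
--             freq[(a, b, c)] = freq.get((a, b, c), 0) + 1
--     freq_items = {k: v for k, v in freq.items() if v > threshold}
--     return freq, freq_items
-- ===== Notes on version B (the rewrite author's own statement) =====
-- stated objective: alternative
-- what changed: B pre-filters each basket to frequent items once (set membership) and enumerates the triples with a recursive combination generator over the filtered list, instead of A's three nested index loops over the raw basket with a per-triple membership test; the threshold pass becomes a comprehension.
import Mathlib
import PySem

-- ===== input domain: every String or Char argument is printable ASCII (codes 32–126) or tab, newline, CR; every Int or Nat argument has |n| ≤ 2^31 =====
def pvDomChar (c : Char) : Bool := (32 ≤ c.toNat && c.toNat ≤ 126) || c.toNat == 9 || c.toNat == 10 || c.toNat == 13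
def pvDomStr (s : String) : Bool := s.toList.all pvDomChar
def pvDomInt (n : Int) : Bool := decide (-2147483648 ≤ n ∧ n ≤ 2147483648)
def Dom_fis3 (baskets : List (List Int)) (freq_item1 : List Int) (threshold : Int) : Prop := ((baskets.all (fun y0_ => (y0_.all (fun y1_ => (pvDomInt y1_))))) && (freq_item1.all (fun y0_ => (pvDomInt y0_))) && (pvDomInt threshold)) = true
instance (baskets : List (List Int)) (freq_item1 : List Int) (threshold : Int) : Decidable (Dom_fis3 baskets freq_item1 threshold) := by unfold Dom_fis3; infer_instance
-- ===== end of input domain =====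

-- B replaces A's cubic index loops with a recursive combination generator over the
-- basket pre-filtered to frequent items (objective: alternative decomposition);
-- return value proved identical.

-- ===== PORT A =====
-- literal transliteration of Source A; basket[i]/basket[j]/basket[k] are always in
-- range (indices come from range(len(basket))), so pyGetD with default 0 is exact,
-- and freq[key] += 1 reads an existing key, so getD with default 0 is exact there too.
def fis3 (baskets : List (List Int)) (freq_item1 : List Int) (threshold : Int) : (List (Int × Int × Int × Int)) × (List (Int × Int × Int × Int)) :=
  let freq : PySem.Dict (Int × Int × Int) Int :=
    baskets.foldl (fun freq basket =>
      (PySem.List.pyRange 0 (basket.length : Int) 1).foldl (fun freq i =>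
        (PySem.List.pyRange (i+1) (basket.length : Int) 1).foldl (fun freq j =>
          (PySem.List.pyRange (j+1) (basket.length : Int) 1).foldl (fun freq k =>
            if PySem.List.pyGetD basket i 0 ∈ freq_item1 ∧ PySem.List.pyGetD basket j 0 ∈ freq_item1 ∧ PySem.List.pyGetD basket k 0 ∈ freq_item1 then
              let l := PySem.List.sorted [PySem.List.pyGetD basket i 0, PySem.List.pyGetD basket j 0, PySem.List.pyGetD basket k 0] (fun x => x) false
              let key := (PySem.List.pyGetD l 0 0, PySem.List.pyGetD l 1 0, PySem.List.pyGetD l 2 0)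
              let freq := if freq.contains key then freq else freq.insert key 0
              freq.insert key (freq.getD key 0 + 1)
            else freq) freq) freq) freq) PySem.Dict.empty
  let freq_items : PySem.Dict (Int × Int × Int) Int :=
    freq.items.foldl (fun d kv => if kv.2 > threshold then d.insert kv.1 kv.2 else d) PySem.Dict.empty
  (freq.items.map (fun p => (p.1.1, p.1.2.1, p.1.2.2, p.2)),
   freq_items.items.map (fun p => (p.1.1, p.1.2.1, p.1.2.2, p.2)))

-- ===== PORT B =====
-- literal transliteration of Source B (_pairs, _triples, fis3)
def pairsB : List Int → List (Int × Int)
  | [] => []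
  | x :: t => (t.map (fun y => (x, y))) ++ pairsB t

def triplesB : List Int → List (Int × Int × Int)
  | [] => []
  | x :: t => ((pairsB t).map (fun p => (x, p.1, p.2))) ++ triplesB t

def fis3_alt (baskets : List (List Int)) (freq_item1 : List Int) (threshold : Int) : (List (Int × Int × Int × Int)) × (List (Int × Int × Int × Int)) :=
  let frequent := PySem.Set.ofList freq_item1
  let freq : PySem.Dict (Int × Int × Int) Int :=
    baskets.foldl (fun freq basket =>
      (triplesB (basket.filter (fun x => PySem.Set.contains frequent x))).foldl (fun freq t =>
        let s := PySem.List.sorted [t.1, t.2.1, t.2.2] (fun x => x) false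
        let key := (PySem.List.pyGetD s 0 0, PySem.List.pyGetD s 1 0, PySem.List.pyGetD s 2 0)
        freq.insert key (freq.getD key 0 + 1)) freq) PySem.Dict.empty
  let freq_items : PySem.Dict (Int × Int × Int) Int :=
    (freq.items.filter (fun kv => kv.2 > threshold)).foldl (fun d kv => d.insert kv.1 kv.2) PySem.Dict.empty
  (freq.items.map (fun p => (p.1.1, p.1.2.1, p.1.2.2, p.2)),
   freq_items.items.map (fun p => (p.1.1, p.1.2.1, p.1.2.2, p.2)))

-- ===== PRECONDITION & SPEC =====
def Spec_fis3 (baskets : List (List Int)) (freq_item1 : List Int) (threshold : Int) (out : (List (Int × Int × Int × Int)) × (List (Int × Int × Int × Int))) : Prop := out = fis3_alt baskets freq_item1 threshold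
instance (baskets : List (List Int)) (freq_item1 : List Int) (threshold : Int) (out : (List (Int × Int × Int × Int)) × (List (Int × Int × Int × Int))) : Decidable (Spec_fis3 baskets freq_item1 threshold out) := by unfold Spec_fis3; infer_instance

-- ===== CLAIM (what is proved, stated in full; the proofs are below) =====
def Claim_equal_fis3 : Prop := ∀ (baskets : List (List Int)) (freq_item1 : List Int) (threshold : Int), Dom_fis3 baskets freq_item1 threshold → Spec_fis3 baskets freq_item1 threshold (fis3 baskets freq_item1 threshold)

-- ===== LEMMAS AND PROOFS =====

-- proof-side abbreviations for the loop bodies shared by the two ports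
def key3 (a b c : Int) : Int × Int × Int :=
  let s := PySem.List.sorted [a, b, c] (fun x => x) false
  (PySem.List.pyGetD s 0 0, PySem.List.pyGetD s 1 0, PySem.List.pyGetD s 2 0)

def step (d : PySem.Dict (Int × Int × Int) Int) (k : Int × Int × Int) : PySem.Dict (Int × Int × Int) Int :=
  d.insert k (d.getD k 0 + 1)

def stepA (d : PySem.Dict (Int × Int × Int) Int) (k : Int × Int × Int) : PySem.Dict (Int × Int × Int) Int :=
  let d1 := if d.contains k then d else d.insert k 0
  d1.insert k (d1.getD k 0 + 1)

-- inserting twice at the same key equals inserting once (overwrite keeps position)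
theorem insert_insert_same (d : PySem.Dict (Int × Int × Int) Int) (k : Int × Int × Int) (v w : Int) :
    (d.insert k v).insert k w = d.insert k w := by
  have h2 : (d.insert k v).contains k = true := PySem.Dict.contains_insert_self d k v
  by_cases hc : d.contains k = true
  · have h3 : (PySem.Dict.mk (d.items.map (fun p => if p.1 == k then (k, v) else p)) :
        PySem.Dict (Int × Int × Int) Int).contains k = true := by
      simpa only [PySem.Dict.insert, hc, if_pos] using h2
    simp only [PySem.Dict.insert, hc, if_pos, h3, List.map_map]
    congr 1
    apply List.map_congr_left
    intro p _
    by_cases hp : p.1 = k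
    · simp [Function.comp, hp]
    · simp [Function.comp, hp]
  · have h3 : (PySem.Dict.mk (d.items ++ [(k, v)]) :
        PySem.Dict (Int × Int × Int) Int).contains k = true := by
      simpa only [PySem.Dict.insert, hc, Bool.false_eq_true, if_false] using h2
    simp only [PySem.Dict.insert, hc, Bool.false_eq_true, if_false, h3, if_pos]
    have hall : ∀ p ∈ d.items, p.1 ≠ k := by
      intro p hp hpk
      apply hc
      have : k ∈ d.keys := by
        have : p.1 ∈ d.items.map (fun q => q.1) := List.mem_map_of_mem hp
        simpa [PySem.Dict.keys, hpk] using this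
      simpa [PySem.Dict.contains_eq_decide_mem_keys] using this
    congr 1
    rw [List.map_append]
    have h1 : d.items.map (fun p => if p.1 == k then (k, w) else p) = d.items.map id := by
      apply List.map_congr_left
      intro p hp
      simp [hall p hp]
    rw [h1]
    simp

theorem stepA_eq_step (d : PySem.Dict (Int × Int × Int) Int) (k : Int × Int × Int) :
    stepA d k = step d k := by
  by_cases hc : d.contains k = true
  · simp [stepA, step, hc]
  · simp only [stepA, step, hc, Bool.false_eq_true, if_neg, not_false_iff]
    rw [PySem.Dict.getD_insert_self, PySem.Dict.getD_of_not_contains d 0 (by simpa using hc),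
      insert_insert_same]

-- suffix-recursion models of A's j- and i-loops over one basket
def jloop (F : List Int) (bi : Int) : List Int → PySem.Dict (Int × Int × Int) Int → PySem.Dict (Int × Int × Int) Int
  | [], d => d
  | y :: t, d => jloop F bi t (t.foldl (fun d z => if bi ∈ F ∧ y ∈ F ∧ z ∈ F then stepA d (key3 bi y z) else d) d)

def iloop (F : List Int) : List Int → PySem.Dict (Int × Int × Int) Int → PySem.Dict (Int × Int × Int) Int
  | [], d => d
  | x :: t, d => iloop F t (jloop F x t d)

-- A's k-loop then j-loop over indices ≥ j equal the suffix model on basket.drop j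
theorem jrange_eq_jloop (F : List Int) (basket : List Int) (bi : Int) :
    ∀ (t : List Int) (j : Int) (d : PySem.Dict (Int × Int × Int) Int), 0 ≤ j → basket.drop j.toNat = t →
    (PySem.List.pyRange j (basket.length : Int) 1).foldl (fun d j' =>
      (PySem.List.pyRange (j' + 1) (basket.length : Int) 1).foldl (fun d k =>
        if bi ∈ F ∧ PySem.List.pyGetD basket j' 0 ∈ F ∧ PySem.List.pyGetD basket k 0 ∈ F then
          stepA d (key3 bi (PySem.List.pyGetD basket j' 0) (PySem.List.pyGetD basket k 0))
        else d) d) d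
    = jloop F bi t d := by
  intro t
  induction t with
  | nil =>
    intro j d hj hdrop
    have hlen : basket.length ≤ j.toNat := List.drop_eq_nil_iff.mp hdrop
    have : (basket.length : Int) ≤ j := by omega
    rw [PySem.List.pyRange_one_eq_nil this]
    rfl
  | cons y t' ih =>
    intro j d hj hdrop
    have hlt : j.toNat < basket.length := by
      by_contra h
      rw [List.drop_eq_nil_iff.mpr (by omega)] at hdrop
      simp at hdrop
    have hjlt : j < (basket.length : Int) := by omega
    rw [PySem.List.pyRange_one_cons hjlt, List.foldl_cons]
    have hy : PySem.List.pyGetD basket j 0 = y := by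
      rw [PySem.List.pyGetD_eq_getElem basket 0 hj (by exact_mod_cast hjlt)]
      have h0 : (basket.drop j.toNat)[0]'(by rw [hdrop]; simp) = y := by simp [hdrop]
      rw [List.getElem_drop] at h0
      simpa using h0
    have hdrop' : basket.drop (j + 1).toNat = t' := by
      have h1 : (j + 1).toNat = j.toNat + 1 := by omega
      rw [h1, ← List.drop_drop, hdrop]
      rfl
    rw [PySem.List.foldl_pyRange_pyGetD' basket 0
      (fun d z => if bi ∈ F ∧ PySem.List.pyGetD basket j 0 ∈ F ∧ z ∈ F then
        stepA d (key3 bi (PySem.List.pyGetD basket j 0) z) else d) d (by omega)]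
    rw [hdrop', hy]
    rw [ih (j + 1) _ (by omega) hdrop']
    rfl

theorem irange_eq_iloop (F : List Int) (basket : List Int) :
    ∀ (t : List Int) (j : Int) (d : PySem.Dict (Int × Int × Int) Int), 0 ≤ j → basket.drop j.toNat = t →
    (PySem.List.pyRange j (basket.length : Int) 1).foldl (fun d i =>
      (PySem.List.pyRange (i + 1) (basket.length : Int) 1).foldl (fun d j' =>
        (PySem.List.pyRange (j' + 1) (basket.length : Int) 1).foldl (fun d k =>
          if PySem.List.pyGetD basket i 0 ∈ F ∧ PySem.List.pyGetD basket j' 0 ∈ F ∧ PySem.List.pyGetD basket k 0 ∈ F then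
            stepA d (key3 (PySem.List.pyGetD basket i 0) (PySem.List.pyGetD basket j' 0) (PySem.List.pyGetD basket k 0))
          else d) d) d) d
    = iloop F t d := by
  intro t
  induction t with
  | nil =>
    intro j d hj hdrop
    have hlen : basket.length ≤ j.toNat := List.drop_eq_nil_iff.mp hdrop
    have : (basket.length : Int) ≤ j := by omega
    rw [PySem.List.pyRange_one_eq_nil this]
    rfl
  | cons x t' ih =>
    intro j d hj hdrop
    have hlt : j.toNat < basket.length := by
      by_contra h
      rw [List.drop_eq_nil_iff.mpr (by omega)] at hdrop
      simp at hdrop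
    have hjlt : j < (basket.length : Int) := by omega
    rw [PySem.List.pyRange_one_cons hjlt, List.foldl_cons]
    have hx : PySem.List.pyGetD basket j 0 = x := by
      rw [PySem.List.pyGetD_eq_getElem basket 0 hj (by exact_mod_cast hjlt)]
      have h0 : (basket.drop j.toNat)[0]'(by rw [hdrop]; simp) = x := by simp [hdrop]
      rw [List.getElem_drop] at h0
      simpa using h0
    have hdrop' : basket.drop (j + 1).toNat = t' := by
      have h1 : (j + 1).toNat = j.toNat + 1 := by omega
      rw [h1, ← List.drop_drop, hdrop]
      rfl
    rw [hx]
    rw [jrange_eq_jloop F basket x t' (j + 1) d (by omega) hdrop']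
    rw [ih (j + 1) _ (by omega) hdrop']
    rfl

-- the suffix models compute B's folds over the generated pair/triple lists
theorem jloop_eq_pairs (F : List Int) (bi : Int) :
    ∀ (t : List Int) (d : PySem.Dict (Int × Int × Int) Int),
    jloop F bi t d = if bi ∈ F then
      ((pairsB (t.filter (fun x => decide (x ∈ F)))).foldl (fun d p => step d (key3 bi p.1 p.2)) d)
    else d := by
  intro t
  induction t with
  | nil => intro d; simp [jloop, pairsB]
  | cons y t' ih =>
    intro d
    by_cases hbi : bi ∈ F
    · by_cases hy : y ∈ F
      · have hinner : (t'.foldl (fun d z => if bi ∈ F ∧ y ∈ F ∧ z ∈ F then stepA d (key3 bi y z) else d) d)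
            = (t'.filter (fun x => decide (x ∈ F))).foldl (fun d z => step d (key3 bi y z)) d := by
          rw [List.foldl_filter]
          apply PySem.List.foldl_congr_mem
          intro d' a _
          by_cases hz : a ∈ F <;> simp [hbi, hy, hz, stepA_eq_step]
        simp only [jloop]
        rw [hinner, ih]
        simp only [hbi, if_pos]
        rw [List.filter_cons_of_pos (by simp [hy])]
        simp only [pairsB, List.foldl_append, List.foldl_map]
      · have hinner : (t'.foldl (fun d z => if bi ∈ F ∧ y ∈ F ∧ z ∈ F then stepA d (key3 bi y z) else d) d) = d := by
          calc t'.foldl (fun d z => if bi ∈ F ∧ y ∈ F ∧ z ∈ F then stepA d (key3 bi y z) else d) d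
              = t'.foldl (fun d _ => d) d :=
                PySem.List.foldl_congr_mem t' _ _ d (by intro d' a _; simp [hy])
            _ = d := List.foldl_fixed ..
        simp only [jloop]
        rw [hinner, ih]
        rw [List.filter_cons_of_neg (by simp [hy])]
    · have hinner : (t'.foldl (fun d z => if bi ∈ F ∧ y ∈ F ∧ z ∈ F then stepA d (key3 bi y z) else d) d) = d := by
        calc t'.foldl (fun d z => if bi ∈ F ∧ y ∈ F ∧ z ∈ F then stepA d (key3 bi y z) else d) d
            = t'.foldl (fun d _ => d) d :=
              PySem.List.foldl_congr_mem t' _ _ d (by intro d' a _; simp [hbi])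
          _ = d := List.foldl_fixed ..
      simp only [jloop]
      rw [hinner, ih]
      simp [hbi]

theorem iloop_eq_triples (F : List Int) :
    ∀ (t : List Int) (d : PySem.Dict (Int × Int × Int) Int),
    iloop F t d = (triplesB (t.filter (fun x => decide (x ∈ F)))).foldl
      (fun d t3 => step d (key3 t3.1 t3.2.1 t3.2.2)) d := by
  intro t
  induction t with
  | nil => intro d; simp [iloop, triplesB]
  | cons x t' ih =>
    intro d
    by_cases hx : x ∈ F
    · simp only [iloop]
      rw [jloop_eq_pairs, if_pos hx, ih]
      rw [List.filter_cons_of_pos (by simp [hx])]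
      simp only [triplesB, List.foldl_append, List.foldl_map]
    · simp only [iloop]
      rw [jloop_eq_pairs, if_neg hx, ih]
      rw [List.filter_cons_of_neg (by simp [hx])]

-- per-basket equality of the two ports' loop bodies, phrased with step/stepA/key3
theorem basket_body_eq (F : List Int) (basket : List Int) (d : PySem.Dict (Int × Int × Int) Int) :
    (PySem.List.pyRange 0 (basket.length : Int) 1).foldl (fun freq i =>
      (PySem.List.pyRange (i + 1) (basket.length : Int) 1).foldl (fun freq j =>
        (PySem.List.pyRange (j + 1) (basket.length : Int) 1).foldl (fun freq k =>
          if PySem.List.pyGetD basket i 0 ∈ F ∧ PySem.List.pyGetD basket j 0 ∈ F ∧ PySem.List.pyGetD basket k 0 ∈ F then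
            stepA freq (key3 (PySem.List.pyGetD basket i 0) (PySem.List.pyGetD basket j 0) (PySem.List.pyGetD basket k 0))
          else freq) freq) freq) d
    = (triplesB (basket.filter (fun x => PySem.Set.contains (PySem.Set.ofList F) x))).foldl
        (fun freq t => step freq (key3 t.1 t.2.1 t.2.2)) d := by
  have hfilter : basket.filter (fun x => PySem.Set.contains (PySem.Set.ofList F) x)
      = basket.filter (fun x => decide (x ∈ F)) := by
    apply List.filter_congr
    intro x _
    simp [PySem.Set.mem_ofList]
  rw [hfilter, irange_eq_iloop F basket basket 0 d le_rfl (by simp), iloop_eq_triples]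

-- the threshold filter: A's fold-with-if equals B's filter-then-fold
theorem filter_fold_eq (threshold : Int) (q : PySem.Dict (Int × Int × Int) Int) :
    (q.items.filter (fun kv => kv.2 > threshold)).foldl
        (fun d kv => d.insert kv.1 kv.2) (PySem.Dict.empty : PySem.Dict (Int × Int × Int) Int)
    = q.items.foldl (fun d kv => if kv.2 > threshold then d.insert kv.1 kv.2 else d)
        (PySem.Dict.empty : PySem.Dict (Int × Int × Int) Int) := by
  rw [List.foldl_filter]
  apply PySem.List.foldl_congr_mem
  intro d kv _
  by_cases h : kv.2 > threshold <;> simp [h]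

-- ===== VERDICT (by name: the statement is the Claim_ definition above) =====
theorem fis3_spec : Claim_equal_fis3 := by
  intro baskets freq_item1 threshold _
  unfold Spec_fis3
  have hA : fis3 baskets freq_item1 threshold =
      (let q : PySem.Dict (Int × Int × Int) Int := baskets.foldl (fun freq basket =>
        (PySem.List.pyRange 0 (basket.length : Int) 1).foldl (fun freq i =>
          (PySem.List.pyRange (i + 1) (basket.length : Int) 1).foldl (fun freq j =>
            (PySem.List.pyRange (j + 1) (basket.length : Int) 1).foldl (fun freq k =>
              if PySem.List.pyGetD basket i 0 ∈ freq_item1 ∧ PySem.List.pyGetD basket j 0 ∈ freq_item1 ∧ PySem.List.pyGetD basket k 0 ∈ freq_item1 then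
                stepA freq (key3 (PySem.List.pyGetD basket i 0) (PySem.List.pyGetD basket j 0) (PySem.List.pyGetD basket k 0))
              else freq) freq) freq) freq) PySem.Dict.empty
       (q.items.map (fun p => (p.1.1, p.1.2.1, p.1.2.2, p.2)),
        (q.items.foldl (fun d kv => if kv.2 > threshold then d.insert kv.1 kv.2 else d)
          (PySem.Dict.empty : PySem.Dict (Int × Int × Int) Int)).items.map
            (fun p => (p.1.1, p.1.2.1, p.1.2.2, p.2)))) := rfl
  have hB : fis3_alt baskets freq_item1 threshold =
      (let q : PySem.Dict (Int × Int × Int) Int := baskets.foldl (fun freq basket =>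
        (triplesB (basket.filter (fun x => PySem.Set.contains (PySem.Set.ofList freq_item1) x))).foldl
          (fun freq t => step freq (key3 t.1 t.2.1 t.2.2)) freq) PySem.Dict.empty
       (q.items.map (fun p => (p.1.1, p.1.2.1, p.1.2.2, p.2)),
        ((q.items.filter (fun kv => kv.2 > threshold)).foldl (fun d kv => d.insert kv.1 kv.2)
          (PySem.Dict.empty : PySem.Dict (Int × Int × Int) Int)).items.map
            (fun p => (p.1.1, p.1.2.1, p.1.2.2, p.2)))) := rfl
  rw [hA, hB]
  have hq : baskets.foldl (fun freq basket =>
        (PySem.List.pyRange 0 (basket.length : Int) 1).foldl (fun freq i =>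
          (PySem.List.pyRange (i + 1) (basket.length : Int) 1).foldl (fun freq j =>
            (PySem.List.pyRange (j + 1) (basket.length : Int) 1).foldl (fun freq k =>
              if PySem.List.pyGetD basket i 0 ∈ freq_item1 ∧ PySem.List.pyGetD basket j 0 ∈ freq_item1 ∧ PySem.List.pyGetD basket k 0 ∈ freq_item1 then
                stepA freq (key3 (PySem.List.pyGetD basket i 0) (PySem.List.pyGetD basket j 0) (PySem.List.pyGetD basket k 0))
              else freq) freq) freq) freq) (PySem.Dict.empty : PySem.Dict (Int × Int × Int) Int)
      = baskets.foldl (fun freq basket =>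
        (triplesB (basket.filter (fun x => PySem.Set.contains (PySem.Set.ofList freq_item1) x))).foldl
          (fun freq t => step freq (key3 t.1 t.2.1 t.2.2)) freq)
          (PySem.Dict.empty : PySem.Dict (Int × Int × Int) Int) := by
    apply PySem.List.foldl_congr_mem
    intro d basket _
    exact basket_body_eq freq_item1 basket d
  simp only [hq, filter_fold_eq]
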